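-- pv_equiv track=rewrite | github.com/s02blom/ubiquitous-pancake_grupe_10 | main.py | classify_color
-- ===== SOURCE A (Python) =====
-- COLORS = {
--     "red": (48,16,26),
--     "blue": (7,19,37),
--     "yellow line": (39,35,10),
--     "brown": (14,9,12),
--     "black": (0,0,0),
--     "purple": (9,10,32),
--     "middle circle": (10,12,8),
--     "green": (6,24,14),
--     "white": (46,55,97)
-- }
--
-- def classify_color(rgb_in):
--     OFFSET = 13
--     match_r = []
--     match_g = []
--     match_b = []
--     r_in, g_in, b_in = rgb_in
--     for color_key in COLORS.keys():
--         r, g, b = COLORS[color_key]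
--         if r_in < (r + OFFSET) and r_in > (r - OFFSET):
--             match_r.append(color_key)
--         if g_in < (g + OFFSET) and g_in > (g - OFFSET):
--             match_g.append(color_key)
--         if b_in < (b + OFFSET) and b_in > (b - OFFSET):
--             match_b.append(color_key)
--     matches = []
--     for color_key in COLORS.keys():
--         if color_key in match_r and color_key in match_g and color_key in match_b:
--             matches.append(color_key)
--     if len(matches) == 0:
--         return [None]
--     return matches
-- ===== SOURCE B (Python) =====
-- COLORS = {
--     "red": (48,16,26),
--     "blue": (7,19,37),
--     "yellow line": (39,35,10),
--     "brown": (14,9,12),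
--     "black": (0,0,0),
--     "purple": (9,10,32),
--     "middle circle": (10,12,8),
--     "green": (6,24,14),
--     "white": (46,55,97)
-- }
--
-- def classify_color(rgb_in):
--     OFFSET = 13
--     r_in, g_in, b_in = rgb_in
--     matches = [name for name, (r, g, b) in COLORS.items()
--                if abs(r_in - r) < OFFSET and abs(g_in - g) < OFFSET and abs(b_in - b) < OFFSET]
--     return matches if matches else [None]
-- ===== Notes on version B (the rewrite author's own statement) =====
-- stated objective: simpler
-- what changed: B replaces A's two passes (three per-channel match lists, then a membership-intersection loop) with a single comprehension over COLORS.items() testing all three channels at once via abs(x - c) < OFFSET.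
import Mathlib
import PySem

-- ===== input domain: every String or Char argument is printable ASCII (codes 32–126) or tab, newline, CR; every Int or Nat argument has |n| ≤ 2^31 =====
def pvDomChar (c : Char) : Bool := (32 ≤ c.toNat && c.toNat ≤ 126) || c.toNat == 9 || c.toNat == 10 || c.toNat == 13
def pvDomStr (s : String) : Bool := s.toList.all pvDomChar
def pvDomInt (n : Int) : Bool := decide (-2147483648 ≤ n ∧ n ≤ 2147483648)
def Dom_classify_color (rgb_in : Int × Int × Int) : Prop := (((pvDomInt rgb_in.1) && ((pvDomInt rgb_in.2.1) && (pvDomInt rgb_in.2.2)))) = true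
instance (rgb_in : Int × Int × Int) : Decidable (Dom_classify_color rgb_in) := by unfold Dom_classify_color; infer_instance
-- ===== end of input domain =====

-- B replaces A's two passes (three per-channel match lists + a membership-intersection loop)
-- with a single filter over the color table testing all three channels at once (objective: simpler).


-- ===== PORT A =====
def COLORS : PySem.Dict String (Int × Int × Int) := PySem.Dict.ofList
  [("red", (48,16,26)), ("blue", (7,19,37)), ("yellow line", (39,35,10)),
   ("brown", (14,9,12)), ("black", (0,0,0)), ("purple", (9,10,32)),
   ("middle circle", (10,12,8)), ("green", (6,24,14)), ("white", (46,55,97))]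

-- literal port of A: first loop builds the three per-channel lists, second loop intersects by membership
def classify_color (rgb_in : Int × Int × Int) : List (Option String) :=
  let OFFSET : Int := 13
  let r_in := rgb_in.1
  let g_in := rgb_in.2.1
  let b_in := rgb_in.2.2
  let st := COLORS.keys.foldl (fun (s : List String × List String × List String) color_key =>
    let rgb := (COLORS.get? color_key).getD (0,0,0)   -- COLORS[color_key]: key always present
    (if r_in < rgb.1 + OFFSET ∧ r_in > rgb.1 - OFFSET then s.1 ++ [color_key] else s.1,
     if g_in < rgb.2.1 + OFFSET ∧ g_in > rgb.2.1 - OFFSET then s.2.1 ++ [color_key] else s.2.1,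
     if b_in < rgb.2.2 + OFFSET ∧ b_in > rgb.2.2 - OFFSET then s.2.2 ++ [color_key] else s.2.2))
    ([], [], [])
  let match_r := st.1
  let match_g := st.2.1
  let match_b := st.2.2
  let matchL := COLORS.keys.foldl (fun acc color_key =>
    if color_key ∈ match_r ∧ color_key ∈ match_g ∧ color_key ∈ match_b then acc ++ [color_key] else acc) []
  if matchL.length = 0 then [none] else matchL.map some

-- ===== PORT B =====
def COLORS_LIST : List (String × (Int × Int × Int)) :=
  [("red", (48,16,26)), ("blue", (7,19,37)), ("yellow line", (39,35,10)),
   ("brown", (14,9,12)), ("black", (0,0,0)), ("purple", (9,10,32)),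
   ("middle circle", (10,12,8)), ("green", (6,24,14)), ("white", (46,55,97))]

-- port of B: one filter over the items, all three channels tested at once
def classify_color_alt (rgb_in : Int × Int × Int) : List (Option String) :=
  let OFFSET : Int := 13
  let matchL := (COLORS_LIST.filter fun kv =>
      |rgb_in.1 - kv.2.1| < OFFSET ∧ |rgb_in.2.1 - kv.2.2.1| < OFFSET ∧ |rgb_in.2.2 - kv.2.2.2| < OFFSET).map Prod.fst
  if matchL = [] then [none] else matchL.map some

-- ===== PRECONDITION & SPEC =====
def Spec_classify_color (rgb_in : Int × Int × Int) (out : List (Option String)) : Prop := out = classify_color_alt rgb_in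
instance (rgb_in : Int × Int × Int) (out : List (Option String)) : Decidable (Spec_classify_color rgb_in out) := by unfold Spec_classify_color; infer_instance

-- ===== CLAIM (what is proved, stated in full; the proofs are below) =====
def Claim_equal_classify_color : Prop := ∀ (rgb_in : Int × Int × Int), Dom_classify_color rgb_in → Spec_classify_color rgb_in (classify_color rgb_in)

-- ===== LEMMAS AND PROOFS =====

-- the first loop (three independent appending accumulators) is three filters
theorem tripleLoop (keys : List String) (pr pg pb : String → Prop)
    [DecidablePred pr] [DecidablePred pg] [DecidablePred pb]
    (mr mg mb : List String) :
    keys.foldl (fun (s : List String × List String × List String) k =>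
      (if pr k then s.1 ++ [k] else s.1,
       if pg k then s.2.1 ++ [k] else s.2.1,
       if pb k then s.2.2 ++ [k] else s.2.2)) (mr, mg, mb)
    = (mr ++ keys.filter (fun k => decide (pr k)),
       mg ++ keys.filter (fun k => decide (pg k)),
       mb ++ keys.filter (fun k => decide (pb k))) := by
  induction keys generalizing mr mg mb with
  | nil => simp
  | cons k ks ih =>
      simp only [List.foldl_cons, List.filter_cons]
      by_cases hr : pr k <;> by_cases hg : pg k <;> by_cases hb : pb k <;>
        simp [hr, hg, hb, ih]

theorem filterA_eq (ri gi bi : Int) :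
    (COLORS.keys.filter fun k => decide
       (k ∈ (COLORS.keys.filter fun k' => decide (ri < ((COLORS.get? k').getD (0,0,0)).1 + 13 ∧ ri > ((COLORS.get? k').getD (0,0,0)).1 - 13)) ∧
        k ∈ (COLORS.keys.filter fun k' => decide (gi < ((COLORS.get? k').getD (0,0,0)).2.1 + 13 ∧ gi > ((COLORS.get? k').getD (0,0,0)).2.1 - 13)) ∧
        k ∈ (COLORS.keys.filter fun k' => decide (bi < ((COLORS.get? k').getD (0,0,0)).2.2 + 13 ∧ bi > ((COLORS.get? k').getD (0,0,0)).2.2 - 13))))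
    = (COLORS_LIST.filter fun kv => decide (|ri - kv.2.1| < 13 ∧ |gi - kv.2.2.1| < 13 ∧ |bi - kv.2.2.2| < 13)).map Prod.fst := by
  have hkeys : COLORS.keys = COLORS_LIST.map Prod.fst := by decide
  rw [hkeys, List.filter_map]
  congr 1
  apply List.filter_congr
  intro kv hkv
  have hg0 : COLORS.get? "red" = some (48,16,26) := by decide
  have hg1 : COLORS.get? "blue" = some (7,19,37) := by decide
  have hg2 : COLORS.get? "yellow line" = some (39,35,10) := by decide
  have hg3 : COLORS.get? "brown" = some (14,9,12) := by decide
  have hg4 : COLORS.get? "black" = some (0,0,0) := by decide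
  have hg5 : COLORS.get? "purple" = some (9,10,32) := by decide
  have hg6 : COLORS.get? "middle circle" = some (10,12,8) := by decide
  have hg7 : COLORS.get? "green" = some (6,24,14) := by decide
  have hg8 : COLORS.get? "white" = some (46,55,97) := by decide
  fin_cases hkv <;>
    · simp only [Function.comp_apply, decide_eq_decide, List.mem_filter,
        hg0, hg1, hg2, hg3, hg4, hg5, hg6, hg7, hg8, Option.getD_some]
      simp [COLORS_LIST, abs_lt]
      omega

theorem classify_color_spec : Claim_equal_classify_color := by
  intro rgb _
  obtain ⟨ri, gi, bi⟩ := rgb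
  unfold Spec_classify_color classify_color classify_color_alt
  simp only [tripleLoop, PySem.List.foldl_append_ite_eq_filter, List.nil_append,
    List.length_eq_zero_iff]
  rw [filterA_eq]
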